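-- pv_equiv track=rewrite | github.com/llxp/chain-factory | framework/examples/workflows/ldap/ldap.py | parse_domain_name
-- ===== SOURCE A (Python) =====
-- def parse_domain_name(domain_name) -> str:
--     """
--     creates a DN from a fqdn
--     e.g. domain.local ==> dc=domain,dc=local
--     """
--     if len(domain_name):
--         splitted = domain_name.split('.')
--         domain_dn = ''
--         for part in splitted:
--             domain_dn += ('dc=%s,' % part)
--         return domain_dn[:-1]
--     return ''
-- ===== SOURCE B (Python) =====
-- def parse_domain_name(domain_name) -> str:
--     """
--     creates a DN from a fqdn
--     e.g. domain.local ==> dc=domain,dc=local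
--     """
--     if domain_name:
--         return 'dc=' + domain_name.replace('.', ',dc=')
--     return ''
-- ===== Notes on version B (the rewrite author's own statement) =====
-- stated objective: idiomatic
-- what changed: Replaced the split-into-labels loop with per-label accumulation and trailing-separator slice by a single closed-form substitution: prefix the string once and replace every dot by the separator-plus-prefix, under the same truthiness guard.
import Mathlib
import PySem

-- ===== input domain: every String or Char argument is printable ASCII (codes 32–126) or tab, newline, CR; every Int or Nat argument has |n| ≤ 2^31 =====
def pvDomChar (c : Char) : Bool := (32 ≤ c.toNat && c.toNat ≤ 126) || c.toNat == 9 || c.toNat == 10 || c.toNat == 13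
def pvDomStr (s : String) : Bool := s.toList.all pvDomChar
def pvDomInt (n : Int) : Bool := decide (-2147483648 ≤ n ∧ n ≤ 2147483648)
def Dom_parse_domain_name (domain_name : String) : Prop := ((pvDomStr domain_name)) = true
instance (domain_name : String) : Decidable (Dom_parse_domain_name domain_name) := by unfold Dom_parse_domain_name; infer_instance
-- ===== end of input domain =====

-- B replaces A's split-and-accumulate loop (plus trailing-separator slice) by a single closed-form
-- substitution (prefix once, replace each dot by separator-plus-prefix) under the same guard (idiomatic, same cost).

-- ===== PORT A =====
def parse_domain_name (domain_name : String) : String :=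
  if PySem.Str.len domain_name ≠ 0 then
    let splitted := (PySem.Str.split? domain_name ".").getD []
    let domain_dn := splitted.foldl (fun acc part => acc ++ ("dc=" ++ part ++ ",")) ""
    PySem.Str.slice domain_dn none (some (-1))
  else ""

-- ===== PORT B =====
def parse_domain_name_alt (domain_name : String) : String :=
  if domain_name ≠ "" then "dc=" ++ PySem.Str.replace domain_name "." ",dc=" else ""

-- ===== PRECONDITION & SPEC =====
def Spec_parse_domain_name (domain_name : String) (out : String) : Prop := out = parse_domain_name_alt domain_name
instance (domain_name : String) (out : String) : Decidable (Spec_parse_domain_name domain_name out) := by unfold Spec_parse_domain_name; infer_instance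

-- ===== CLAIM (what is proved, stated in full; the proofs are below) =====
def Claim_equal_parse_domain_name : Prop := ∀ (domain_name : String), Dom_parse_domain_name domain_name → Spec_parse_domain_name domain_name (parse_domain_name domain_name)

-- ===== LEMMAS AND PROOFS =====

-- pvS l = (first label of l split at '.', remaining labels); pvR l = l with '.' replaced by ",dc=".
def pvS : List Char → List Char × List (List Char)
  | [] => ([], [])
  | c :: t => if c = '.' then ([], (pvS t).1 :: (pvS t).2) else (c :: (pvS t).1, (pvS t).2)

def pvR : List Char → List Char
  | [] => []
  | c :: t => if c = '.' then [',', 'd', 'c', '='] ++ pvR t else c :: pvR t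

theorem splitOn_go_spec : ∀ (fuel : Nat) (l cur : List Char) (acc : List (List Char)),
    l.length ≤ fuel →
    PySem.Chars.splitOn.go ['.'] fuel l cur acc
      = acc.reverse ++ (cur.reverse ++ (pvS l).1) :: (pvS l).2 := by
  intro fuel
  induction fuel with
  | zero =>
    intro l cur acc h
    have hl : l = [] := List.eq_nil_of_length_eq_zero (Nat.le_zero.mp h)
    subst hl
    rw [PySem.Chars.splitOn.go]
    simp [pvS]
  | succ n ih =>
    intro l cur acc h
    cases l with
    | nil =>
      rw [PySem.Chars.splitOn.go]
      simp [pvS]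
      omega
    | cons c rest =>
      rw [PySem.Chars.splitOn.go]
      by_cases hc : c = '.'
      · subst hc
        have hpre : List.isPrefixOf ['.'] ('.' :: rest) = true := by
          simp [List.isPrefixOf]
        simp only [hpre, if_true, List.length_singleton, List.drop_succ_cons, List.drop_zero]
        rw [ih rest [] ((List.reverse cur) :: acc) (by simpa using Nat.le_of_succ_le_succ (by simpa using h))]
        simp [pvS]
      · have hpre : List.isPrefixOf ['.'] (c :: rest) = false := by
          simp only [List.isPrefixOf, Bool.and_eq_false_iff, beq_eq_false_iff_ne, ne_eq]
          exact Or.inl fun h0 => hc h0.symm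
        simp only [hpre, Bool.false_eq_true, if_false]
        rw [ih rest (c :: cur) acc (by simpa using Nat.le_of_succ_le_succ (by simpa using h))]
        simp [pvS, hc]

theorem replace_go_spec : ∀ (fuel : Nat) (l acc : List Char),
    l.length ≤ fuel →
    PySem.Chars.replace.go ['.'] [',', 'd', 'c', '='] fuel l acc = acc.reverse ++ pvR l := by
  intro fuel
  induction fuel with
  | zero =>
    intro l acc h
    have hl : l = [] := List.eq_nil_of_length_eq_zero (Nat.le_zero.mp h)
    subst hl
    rw [PySem.Chars.replace.go]
    simp [pvR]
  | succ n ih =>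
    intro l acc h
    cases l with
    | nil =>
      rw [PySem.Chars.replace.go]
      simp [pvR]
      omega
    | cons c rest =>
      rw [PySem.Chars.replace.go]
      by_cases hc : c = '.'
      · subst hc
        have hpre : List.isPrefixOf ['.'] ('.' :: rest) = true := by
          simp [List.isPrefixOf]
        simp only [hpre, if_true, List.length_singleton, List.drop_succ_cons, List.drop_zero]
        rw [ih rest _ (by simpa using Nat.le_of_succ_le_succ (by simpa using h))]
        simp [pvR]
      · have hpre : List.isPrefixOf ['.'] (c :: rest) = false := by
          simp only [List.isPrefixOf, Bool.and_eq_false_iff, beq_eq_false_iff_ne, ne_eq]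
          exact Or.inl fun h0 => hc h0.symm
        simp only [hpre, Bool.false_eq_true, if_false]
        rw [ih rest _ (by simpa using Nat.le_of_succ_le_succ (by simpa using h))]
        simp [pvR, hc]

theorem foldA_toList : ∀ (ps : List (List Char)) (acc : String),
    ((ps.map String.ofList).foldl (fun a p => a ++ ("dc=" ++ p ++ ",")) acc).toList
      = acc.toList ++ ps.flatMap (fun p => ['d', 'c', '='] ++ p ++ [',']) := by
  intro ps
  induction ps with
  | nil => intro acc; simp
  | cons p t ih =>
    intro acc
    have h1 : ("dc=").toList = ['d', 'c', '='] := by decide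
    have h2 : (",").toList = [','] := by decide
    simp only [List.map_cons, List.foldl_cons, List.flatMap_cons]
    rw [ih]
    simp [String.toList_append, h1, h2]

theorem flatMap_pvS : ∀ (l : List Char),
    ((pvS l).1 :: (pvS l).2).flatMap (fun p => ['d', 'c', '='] ++ p ++ [','])
      = ['d', 'c', '='] ++ pvR l ++ [','] := by
  intro l
  induction l with
  | nil => simp [pvS, pvR]
  | cons c t ih =>
    rcases hS : pvS t with ⟨S1, S2⟩
    rw [hS] at ih
    by_cases hc : c = '.'
    · subst hc
      simp only [pvS, pvR, hS, List.flatMap_cons, if_true] at ih ⊢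
      rw [ih]
      simp
    · simp only [pvS, pvR, hS, hc, if_false, List.flatMap_cons] at ih ⊢
      have ih' : S1 ++ [','] ++ S2.flatMap (fun p => ['d', 'c', '='] ++ p ++ [',']) = pvR t ++ [','] := by
        apply List.append_cancel_left (as := ['d', 'c', '='])
        simpa [List.append_assoc] using ih
      simp only [List.cons_append, List.append_assoc] at ih' ⊢
      rw [ih']

theorem toList_ne_nil (s : String) (h : s ≠ "") : s.toList ≠ [] := by
  intro hn
  exact h (String.toList_inj.mp (by simpa using hn))

theorem parse_domain_name_spec : Claim_equal_parse_domain_name := by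
  intro s _hd
  unfold Spec_parse_domain_name
  by_cases hs : s = ""
  · subst hs; decide
  · have hl : s.toList ≠ [] := toList_ne_nil s hs
    apply String.toList_inj.mp
    unfold parse_domain_name parse_domain_name_alt
    rw [if_pos (by simp [PySem.Str.len]; exact fun h0 => hl (by simpa using h0)), if_pos hs]
    have hsplit : (PySem.Str.split? s ".").getD []
        = (PySem.Chars.splitOn s.toList ['.']).map String.ofList := by
      have h1 : (".").toList = ['.'] := by decide
      simp [PySem.Str.split?, PySem.Chars.split?, h1]
    rw [hsplit]
    have hgo : PySem.Chars.splitOn s.toList ['.'] = ((pvS s.toList).1 :: (pvS s.toList).2) := by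
      rw [PySem.Chars.splitOn]
      rw [splitOn_go_spec (s.toList.length + 1) s.toList [] [] (by omega)]
      simp
    rw [PySem.Str.slice_to_neg_one, hgo, foldA_toList, flatMap_pvS]
    have hrep : (PySem.Str.replace s "." ",dc=").toList = pvR s.toList := by
      rw [PySem.Str.toList_replace]
      have h1 : (".").toList = ['.'] := by decide
      have h2 : (",dc=").toList = [',', 'd', 'c', '='] := by decide
      rw [h1, h2, PySem.Chars.replace]
      simp only [List.isEmpty_cons, Bool.false_eq_true, if_false]
      rw [replace_go_spec s.toList.length s.toList [] (le_refl _)]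
      simp
    rw [String.toList_append, hrep]
    have h3 : ("dc=").toList = ['d', 'c', '='] := by decide
    rw [h3]
    have h4 : ("").toList = ([] : List Char) := by decide
    rw [h4, List.nil_append, List.dropLast_concat]
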